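-- pv_equiv track=rewrite | github.com/powerseeker45/IS_220953028 | anushri/CCE_IS_LAB-main/LAB_1/Q2.py | vigenere_key
-- ===== SOURCE A (Python) =====
-- def vigenere_key(message,key):
--     if len(message) == len(key):
--         return key
--     i = 0
--     new_key="" # Kept the spaces matching message in the key so that we can retain those while decrypting
--     for ch in message:
--         if ch!=' ':
--             new_key+=key[i%len(key)]
--             i = (i+1)
--         else:
--             new_key+=' '
--     return new_key
-- ===== SOURCE B (Python) =====
-- def vigenere_key(message, key):
--     if len(message) == len(key):
--         return key
--     words = message.split(' ')
--     total = sum(map(len, words))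
--     rep = (key * (total // len(key) + 1))[:total] if total else ''
--     pieces = []
--     for w in words:
--         pieces.append(rep[:len(w)])
--         rep = rep[len(w):]
--     return ' '.join(pieces)
-- ===== Notes on version B (the rewrite author's own statement) =====
-- stated objective: alternative
-- what changed: A walks the message character by character, carrying a running key index and appending key[i % len(key)] or a space; B works at word level with no per-character loop and no modular indexing: it splits the message on spaces, builds the whole keystream at once by string repetition (key * k truncated), carves it into word-sized slices, and rejoins the slices with spaces.
import Mathlib
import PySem

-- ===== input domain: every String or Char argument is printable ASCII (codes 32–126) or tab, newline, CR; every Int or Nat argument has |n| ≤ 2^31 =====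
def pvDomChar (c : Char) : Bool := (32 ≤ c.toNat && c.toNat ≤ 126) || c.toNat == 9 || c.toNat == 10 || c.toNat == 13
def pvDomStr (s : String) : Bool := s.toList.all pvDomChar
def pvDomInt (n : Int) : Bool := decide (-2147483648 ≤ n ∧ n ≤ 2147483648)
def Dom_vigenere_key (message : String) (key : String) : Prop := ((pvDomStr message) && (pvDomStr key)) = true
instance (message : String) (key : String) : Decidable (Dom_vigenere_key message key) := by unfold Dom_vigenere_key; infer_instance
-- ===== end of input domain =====

-- B replaces A's per-character loop with a running key index by a word-level computation:
-- split on spaces, build the keystream once by key repetition, slice it per word, rejoin.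

-- ===== PORT A =====
-- key[i % len(key)]: exact for Pre_ inputs reaching it (there key ≠ "", so i % len(key) is in
-- range; Python raises ZeroDivisionError for len(key) = 0, which Pre_ excludes).
def pvKeyAt (key : String) (i : Nat) : Char := key.toList.getD (i % key.toList.length) ' '

-- A's for-loop over message, carrying the running non-space index i and emitting one char per step.
def pvGoA (key : String) : List Char → Nat → List Char
  | [], _ => []
  | c :: cs, i =>
    if c ≠ ' ' then pvKeyAt key i :: pvGoA key cs (i + 1)
    else ' ' :: pvGoA key cs i

def vigenere_key (message : String) (key : String) : String :=
  if PySem.Str.len message = PySem.Str.len key then key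
  else String.ofList (pvGoA key message.toList 0)

-- ===== PORT B =====
-- The for-loop over words: pieces.append(rep[:len(w)]); rep = rep[len(w):].
-- The slices have non-negative in-range bounds, so they are exactly take/drop.
def pvChunks : List (List Char) → List Char → List (List Char)
  | [], _ => []
  | w :: ws, rep => rep.take w.length :: pvChunks ws (rep.drop w.length)

def vigenere_key_alt (message : String) (key : String) : String :=
  if PySem.Str.len message = PySem.Str.len key then key
  else
    -- message.split(' '): List.splitOn is exactly Python's split for a one-character separator
    -- (keeps empty pieces, [""] on the empty string)
    let words := message.toList.splitOn ' '
    -- total = sum(map(len, words))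
    let total := (words.map List.length).sum
    -- rep = (key * (total // len(key) + 1))[:total] if total else ''
    let rep : List Char :=
      if total ≠ 0 then ((List.replicate (total / key.toList.length + 1) key.toList).flatten).take total
      else []
    String.ofList (PySem.Chars.join [' '] (pvChunks words rep))

-- ===== PRECONDITION & SPEC =====
-- Pre_ excludes exactly the inputs where Python A raises ZeroDivisionError (key empty while the
-- message, of a different length, contains a non-space character); Python B raises there too.
def Pre_vigenere_key (message : String) (key : String) : Prop :=
  key ≠ "" ∨ ∀ c ∈ message.toList, c = ' '
instance (message : String) (key : String) : Decidable (Pre_vigenere_key message key) := by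
  unfold Pre_vigenere_key; infer_instance

def pvWitness_vigenere_key : String × String := ("attack at dawn", "key")

def Spec_vigenere_key (message : String) (key : String) (out : String) : Prop := out = vigenere_key_alt message key
instance (message : String) (key : String) (out : String) : Decidable (Spec_vigenere_key message key out) := by unfold Spec_vigenere_key; infer_instance

-- ===== CLAIM (what is proved, stated in full; the proofs are below) =====
def Claim_equal_vigenere_key : Prop := ∀ (message : String) (key : String), Dom_vigenere_key message key → Pre_vigenere_key message key → Spec_vigenere_key message key (vigenere_key message key)

-- ===== LEMMAS AND PROOFS =====

-- Proof-only middle form: spaces pass through, non-spaces consume the head of a stream.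
def pvInterleave : List Char → List Char → List Char
  | [], _ => []
  | c :: cs, s =>
    if c = ' ' then ' ' :: pvInterleave cs s
    else s.headD ' ' :: pvInterleave cs s.tail

-- Interleaving cs with the keystream chars at offsets i, i+1, … equals A's fused loop at index i.
theorem pvInterleave_go (key : String) (cs : List Char) (i : Nat) :
    pvInterleave cs ((List.range (cs.filter (fun c => c ≠ ' ')).length).map
      (fun j => pvKeyAt key (i + j))) = pvGoA key cs i := by
  induction cs generalizing i with
  | nil => simp [pvInterleave, pvGoA]
  | cons c cs ih =>
    simp only [ne_eq, decide_not] at ih ⊢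
    by_cases hc : c = ' '
    · simp [pvInterleave, pvGoA, hc, ih]
    · have hcnt : ((c :: cs).filter (fun c => !decide (c = ' '))).length
          = (cs.filter (fun c => !decide (c = ' '))).length + 1 := by simp [hc]
      rw [hcnt, List.range_succ_eq_map]
      simp only [List.map_cons, List.map_map]
      have hfun : ((fun j => pvKeyAt key (i + j)) ∘ Nat.succ)
          = (fun j => pvKeyAt key ((i + 1) + j)) := by
        funext j; simp [Function.comp]; ring_nf
      rw [hfun]
      simp [pvInterleave, pvGoA, hc, ih]

theorem pvJoin_single (w : List Char) : PySem.Chars.join [' '] [w] = w := by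
  simp [PySem.Chars.join, List.intercalate, List.intersperse]

theorem pvJoin_cons2 (w p : List Char) (ps : List (List Char)) :
    PySem.Chars.join [' '] (w :: p :: ps) = w ++ ' ' :: PySem.Chars.join [' '] (p :: ps) := by
  simp [PySem.Chars.join, List.intercalate, List.intersperse]

theorem pvJoin_cons_head (a : Char) (t : List Char) (ps : List (List Char)) :
    PySem.Chars.join [' '] ((a :: t) :: ps) = a :: PySem.Chars.join [' '] (t :: ps) := by
  cases ps with
  | nil => rw [pvJoin_single, pvJoin_single]
  | cons p ps => rw [pvJoin_cons2, pvJoin_cons2]; rfl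

-- Word lengths of the split sum to the number of non-space characters.
theorem pvSum_len_splitOn (cs : List Char) :
    ((cs.splitOn ' ').map List.length).sum = (cs.filter (fun c => c ≠ ' ')).length := by
  induction cs with
  | nil => rfl
  | cons c cs ih =>
    simp only [List.splitOn] at ih ⊢
    rw [List.splitOnP_cons]
    by_cases hc : c = ' '
    · simp [hc, ih]
    · rcases hW : cs.splitOnP (· == ' ') with _ | ⟨w, ws⟩
      · exact absurd hW (List.splitOnP_ne_nil _ cs)
      · rw [if_neg (by simp [hc] : ¬ ((c == ' ') = true))]
        simp only [List.modifyHead]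
        rw [hW] at ih
        have hfc : ((c :: cs).filter (fun c => c ≠ ' ')).length
            = (cs.filter (fun c => c ≠ ' ')).length + 1 := by simp [hc]
        rw [hfc]
        simp only [List.map_cons, List.sum_cons, List.length_cons] at ih ⊢
        omega

-- Splitting, slicing a stream into word-sized chunks, and rejoining with spaces is interleaving.
theorem pvJoin_chunks (cs : List Char) : ∀ s : List Char,
    (cs.filter (fun c => c ≠ ' ')).length ≤ s.length →
    PySem.Chars.join [' '] (pvChunks (cs.splitOn ' ') s) = pvInterleave cs s := by
  induction cs with
  | nil =>
    intro s _
    simp [pvChunks, pvInterleave]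
  | cons c cs ih =>
    intro s hs
    simp only [List.splitOn] at ih ⊢
    rw [List.splitOnP_cons]
    by_cases hc : c = ' '
    · subst hc
      rcases hW : cs.splitOnP (· == ' ') with _ | ⟨w, ws⟩
      · exact absurd hW (List.splitOnP_ne_nil _ cs)
      · rw [if_pos (by simp : ((' ' : Char) == ' ') = true)]
        have hs' : (cs.filter (fun c => c ≠ ' ')).length ≤ s.length := by
          simpa using hs
        have hih := ih s hs'
        rw [hW] at hih
        simp only [pvChunks, List.length_nil, List.take_zero, List.drop_zero] at hih ⊢
        rw [pvJoin_cons2, hih]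
        simp [pvInterleave]
    · have hlen : (cs.filter (fun c => c ≠ ' ')).length + 1 ≤ s.length := by
        have : ((c :: cs).filter (fun c => c ≠ ' ')).length
            = (cs.filter (fun c => c ≠ ' ')).length + 1 := by simp [hc]
        omega
      rcases s with _ | ⟨a, s'⟩
      · simp at hlen
      · rcases hW : cs.splitOnP (· == ' ') with _ | ⟨w, ws⟩
        · exact absurd hW (List.splitOnP_ne_nil _ cs)
        · simp only [if_neg (by simp [hc] : ¬ ((c == ' ') = true)), List.modifyHead]
          simp only [pvChunks, List.length_cons, List.take_succ_cons, List.drop_succ_cons]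
          rw [pvJoin_cons_head]
          have hs' : (cs.filter (fun c => c ≠ ' ')).length ≤ s'.length := by
            simp only [List.length_cons] at hlen; omega
          have := ih s' hs'
          rw [hW] at this
          simp only [pvChunks] at this
          rw [this]
          simp [pvInterleave, hc]

-- A prefix of a list is the range-map of its getD.
theorem pvTake_eq_map_range (ks : List Char) (n : Nat) (h : n ≤ ks.length) :
    ks.take n = (List.range n).map (fun j => ks.getD j ' ') := by
  apply List.ext_getElem
  · simp [h]
  · intro i h1 h2
    simp only [List.getElem_take, List.getElem_map, List.getElem_range]
    rw [List.getD_eq_getElem]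

-- Truncating a repetition of ks to length n reads ks cyclically.
theorem pvTake_flatten_replicate (ks : List Char) (hks : ks ≠ []) : ∀ (m n : Nat),
    n ≤ m * ks.length →
    ((List.replicate m ks).flatten).take n
      = (List.range n).map (fun j => ks.getD (j % ks.length) ' ') := by
  intro m
  induction m with
  | zero => intro n hn; simp at hn; simp [hn]
  | succ m ih =>
    intro n hn
    have hL : 0 < ks.length := List.length_pos_iff.mpr hks
    rw [List.replicate_succ, List.flatten_cons, List.take_append]
    by_cases h : n ≤ ks.length
    · have : n - ks.length = 0 := by omega
      rw [this, List.take_zero, List.append_nil, pvTake_eq_map_range ks n h]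
      apply List.map_congr_left
      intro j hj
      rw [Nat.mod_eq_of_lt (lt_of_lt_of_le (List.mem_range.mp hj) h)]
    · have hLe : ks.length ≤ n := le_of_not_ge h
      rw [List.take_of_length_le hLe]
      have hsplit : n = ks.length + (n - ks.length) := by omega
      rw [hsplit, List.range_add, List.map_append, List.map_map]
      congr 1
      · have hmr : (List.range ks.length).map (fun j => ks.getD (j % ks.length) ' ')
            = (List.range ks.length).map (fun j => ks.getD j ' ') :=
          List.map_congr_left (fun j hj => by
            rw [Nat.mod_eq_of_lt (List.mem_range.mp hj)])
        rw [hmr, ← pvTake_eq_map_range ks ks.length le_rfl, List.take_length]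
      · have hidx : ks.length + (n - ks.length) - ks.length = n - ks.length := by omega
        rw [hidx, ih (n - ks.length) (by rw [Nat.succ_mul] at hn; omega)]
        apply List.map_congr_left
        intro j _
        simp [Function.comp, Nat.add_mod_left]

-- ===== VERDICT (by name: the statement is the Claim_ definition above) =====
theorem vigenere_key_spec : Claim_equal_vigenere_key := by
  intro message key _ hpre
  unfold Spec_vigenere_key vigenere_key vigenere_key_alt
  by_cases h : PySem.Str.len message = PySem.Str.len key
  · rw [if_pos h, if_pos h]
  · rw [if_neg h, if_neg h]
    simp only []
    set cs := message.toList with hcs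
    set total := ((cs.splitOn ' ').map List.length).sum with htotal
    have htot : total = (cs.filter (fun c => c ≠ ' ')).length := pvSum_len_splitOn cs
    by_cases h0 : total = 0
    · rw [if_neg (by simp [h0])]
      have hj := pvJoin_chunks cs [] (by rw [List.length_nil, ← htot, h0])
      have hi := pvInterleave_go key cs 0
      rw [← htot, h0] at hi
      simp only [List.range_zero, List.map_nil] at hi
      rw [hj, hi]
    · have hkey : key ≠ "" := by
        rcases hpre with hk | hsp
        · exact hk
        · exfalso
          apply h0
          rw [htot, List.length_eq_zero_iff, List.filter_eq_nil_iff]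
          intro c hcm
          simp [hsp c hcm]
      have hks : key.toList ≠ [] := by simpa using hkey
      have hL : 0 < key.toList.length := List.length_pos_iff.mpr hks
      have hrep : ((List.replicate (total / key.toList.length + 1) key.toList).flatten).take total
          = (List.range total).map (fun j => pvKeyAt key j) := by
        apply pvTake_flatten_replicate key.toList hks
        have hdm := Nat.div_add_mod total key.toList.length
        rw [Nat.mul_comm] at hdm
        have hmlt := Nat.mod_lt total hL
        rw [Nat.add_mul, one_mul]
        omega
      rw [if_pos h0, hrep]
      have hj := pvJoin_chunks cs ((List.range total).map (fun j => pvKeyAt key j))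
        (by rw [List.length_map, List.length_range, ← htot])
      have hi := pvInterleave_go key cs 0
      rw [← htot] at hi
      simp only [Nat.zero_add] at hi
      rw [hj, hi]
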